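-- pv_equiv track=rewrite | github.com/Unknownflow/CS1010X | Extra Practices/CG1101 Basic Sequences Questions/q1.py | easy_sudoku
-- ===== SOURCE A (Python) =====
-- SIZE = 9
--
-- board = ((5, 3, 4, 6, 7, 8, 9, 1, 2),
--
-- (6, 0, 2, 1, 9, 0, 3, 4, 0),
--
-- (1, 9, 8, 3, 4, 2, 0, 6, 7),
--
-- (8, 5, 9, 7, 6, 1, 4, 2, 3),
--
-- (4, 2, 0, 8, 5, 3, 7, 9, 1),
--
-- (7, 1, 3, 9, 2, 4, 8, 5, 6),
--
-- (9, 6, 1, 0, 3, 7, 2, 8, 4),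
--
-- (2, 8, 7, 4, 1, 9, 6, 0, 5),
--
-- (3, 4, 5, 2, 8, 6, 1, 7, 9))
--
-- def easy_sudoku(x, y, n):
--
--     x = x - 1
--
--     y = y - 1
--
--     row_values = []
--
--     col_values = []
--
--     for i in range(SIZE):
--
--         if board[x][i] not in row_values and board[x][i] != n:
--
--             if board[x][i] != 0:
--
--                  row_values.append(board[x][i])
--
--         else:
--
--             return 'Violation'
--
--
--
--         if board[i][y] not in col_values and board[i][y] != n:
--
--             if board[i][y] != 0:
--
--                 col_values.append(board[i][y])
--
--         else:
--
--             return 'Violation'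
--
--
--
--     return 'No violation'
-- ===== SOURCE B (Python) =====
-- SIZE = 9
--
-- board = ((5, 3, 4, 6, 7, 8, 9, 1, 2),
-- (6, 0, 2, 1, 9, 0, 3, 4, 0),
-- (1, 9, 8, 3, 4, 2, 0, 6, 7),
-- (8, 5, 9, 7, 6, 1, 4, 2, 3),
-- (4, 2, 0, 8, 5, 3, 7, 9, 1),
-- (7, 1, 3, 9, 2, 4, 8, 5, 6),
-- (9, 6, 1, 0, 3, 7, 2, 8, 4),
-- (2, 8, 7, 4, 1, 9, 6, 0, 5),
-- (3, 4, 5, 2, 8, 6, 1, 7, 9))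
--
-- def _line_ok(line, n):
--     if n in line:
--         return False
--     nz = [v for v in line if v != 0]
--     return len(set(nz)) == len(nz)
--
-- def easy_sudoku(x, y, n):
--     row = board[x - 1]
--     col = [board[i][y - 1] for i in range(SIZE)]
--     if _line_ok(row, n) and _line_ok(col, n):
--         return 'No violation'
--     return 'Violation'
-- ===== Notes on version B (the rewrite author's own statement) =====
-- stated objective: simpler
-- what changed: B replaces A's single interleaved per-cell loop with incrementally grown seen-lists by materialising the whole row and column and judging each line globally: 'n in line' plus a set-cardinality duplicate check on the line's nonzero entries.
-- outside the precondition, e.g. on easy_sudoku(1, 100, 5): A returns 'Violation', B raises IndexError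
import Mathlib
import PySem

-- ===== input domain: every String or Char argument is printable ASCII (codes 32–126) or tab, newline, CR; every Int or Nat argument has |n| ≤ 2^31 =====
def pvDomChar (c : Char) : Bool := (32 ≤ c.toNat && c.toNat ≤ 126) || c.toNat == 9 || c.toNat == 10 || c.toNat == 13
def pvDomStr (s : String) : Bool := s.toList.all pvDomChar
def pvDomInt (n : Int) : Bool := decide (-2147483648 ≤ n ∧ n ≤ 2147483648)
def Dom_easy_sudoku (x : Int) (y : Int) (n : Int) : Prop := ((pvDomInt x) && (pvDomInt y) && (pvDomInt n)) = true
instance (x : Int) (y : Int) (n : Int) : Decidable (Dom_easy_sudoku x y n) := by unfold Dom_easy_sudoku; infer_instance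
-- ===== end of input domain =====

-- B is a simpler decomposition (materialise row/column, judge each line by membership of n and a
-- set-cardinality duplicate check on its nonzero entries); equivalence is about the return value.

-- the module-level constant `board`
def pvBoard : List (List Int) :=
  [[5, 3, 4, 6, 7, 8, 9, 1, 2],
   [6, 0, 2, 1, 9, 0, 3, 4, 0],
   [1, 9, 8, 3, 4, 2, 0, 6, 7],
   [8, 5, 9, 7, 6, 1, 4, 2, 3],
   [4, 2, 0, 8, 5, 3, 7, 9, 1],
   [7, 1, 3, 9, 2, 4, 8, 5, 6],
   [9, 6, 1, 0, 3, 7, 2, 8, 4],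
   [2, 8, 7, 4, 1, 9, 6, 0, 5],
   [3, 4, 5, 2, 8, 6, 1, 7, 9]]

-- board[r][c] with Python (possibly negative) indexing; total form, only used under Pre_
def pvBget (r c : Int) : Int :=
  (PySem.List.pyGet? ((PySem.List.pyGet? pvBoard r).getD []) c).getD 0

-- ===== PORT A =====
-- the `for i in range(SIZE)` loop of A, index i, accumulators row_values / col_values
def pvAGo (x y n : Int) (i : Nat) (rv cv : List Int) : String :=
  if i < 9 then
    let r := pvBget x (i : Int)
    if !rv.contains r && r != n then
      let rv' := if r != 0 then rv ++ [r] else rv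
      let c := pvBget (i : Int) y
      if !cv.contains c && c != n then
        let cv' := if c != 0 then cv ++ [c] else cv
        pvAGo x y n (i + 1) rv' cv'
      else "Violation"
    else "Violation"
  else "No violation"
termination_by 9 - i

def easy_sudoku (x : Int) (y : Int) (n : Int) : String :=
  pvAGo (x - 1) (y - 1) n 0 [] []

-- ===== PORT B =====
def pvLineOk (line : List Int) (n : Int) : Bool :=
  if line.contains n then false
  else
    let nz := line.filter (fun v => v != 0)
    (PySem.Set.ofList nz).length == nz.length

def easy_sudoku_alt (x : Int) (y : Int) (n : Int) : String :=
  let row := (PySem.List.pyGet? pvBoard (x - 1)).getD []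
  let col := (List.range 9).map (fun (i : Nat) => pvBget (i : Int) (y - 1))
  if pvLineOk row n && pvLineOk col n then "No violation" else "Violation"

-- ===== PRECONDITION & SPEC =====
-- Pre_ requires both indices in Python's valid indexing range -8..9; outside it A raises IndexError,
-- except when the row check already fails at the very first cell, where A accidentally returns
-- 'Violation' before ever touching the out-of-range column (B's materialised column raises there).
def Pre_easy_sudoku (x : Int) (y : Int) (n : Int) : Prop :=
  -8 ≤ x ∧ x ≤ 9 ∧ -8 ≤ y ∧ y ≤ 9
instance (x : Int) (y : Int) (n : Int) : Decidable (Pre_easy_sudoku x y n) := by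
  unfold Pre_easy_sudoku; infer_instance
def pvWitness_easy_sudoku : Int × Int × Int := (1, 1, 0)

def Spec_easy_sudoku (x : Int) (y : Int) (n : Int) (out : String) : Prop := out = easy_sudoku_alt x y n
instance (x : Int) (y : Int) (n : Int) (out : String) : Decidable (Spec_easy_sudoku x y n out) := by unfold Spec_easy_sudoku; infer_instance

-- ===== CLAIM (what is proved, stated in full; the proofs are below) =====
def Claim_equal_easy_sudoku : Prop := ∀ (x : Int) (y : Int) (n : Int), Dom_easy_sudoku x y n → Pre_easy_sudoku x y n → Spec_easy_sudoku x y n (easy_sudoku x y n)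

-- ===== LEMMAS AND PROOFS =====

-- A's check of ONE line, abstracted to the list of its cells with the accumulated seen-list
def pvLineViol (n : Int) : List Int → List Int → Bool
  | [], _ => false
  | v :: vs, seen =>
    if seen.contains v || v == n then true
    else pvLineViol n vs (if v != 0 then seen ++ [v] else seen)

-- the row / column of A, as lists
def pvRowA (x : Int) : List Int := (List.range 9).map (fun (i : Nat) => pvBget x (i : Int))
def pvColA (y : Int) : List Int := (List.range 9).map (fun (i : Nat) => pvBget (i : Int) y)

theorem pvAGo_eq (x y n : Int) :
    ∀ k i, i + k = 9 → ∀ rv cv,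
      pvAGo x y n i rv cv =
        if pvLineViol n ((pvRowA x).drop i) rv || pvLineViol n ((pvColA y).drop i) cv
        then "Violation" else "No violation" := by
  intro k
  induction k with
  | zero =>
    intro i hi rv cv
    have h9 : i = 9 := by omega
    subst h9
    have hr : (pvRowA x).drop 9 = [] :=
      List.drop_eq_nil_of_le (by simp [pvRowA, List.length_map, List.length_range])
    have hc : (pvColA y).drop 9 = [] :=
      List.drop_eq_nil_of_le (by simp [pvColA, List.length_map, List.length_range])
    rw [pvAGo, hr, hc]
    simp [pvLineViol]
  | succ k ih =>
    intro i hi rv cv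
    have hlt : i < 9 := by omega
    have hlr : i < (pvRowA x).length := by
      simp only [pvRowA, List.length_map, List.length_range]; omega
    have hlc : i < (pvColA y).length := by
      simp only [pvColA, List.length_map, List.length_range]; omega
    have hrow : (pvRowA x).drop i = pvBget x (i : Int) :: (pvRowA x).drop (i + 1) := by
      rw [List.drop_eq_getElem_cons hlr]
      congr 1
      simp only [pvRowA, List.getElem_map, List.getElem_range]
    have hcol : (pvColA y).drop i = pvBget (i : Int) y :: (pvColA y).drop (i + 1) := by
      rw [List.drop_eq_getElem_cons hlc]
      congr 1
      simp only [pvColA, List.getElem_map, List.getElem_range]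
    rw [pvAGo, if_pos hlt, hrow, hcol]
    by_cases hr : (!rv.contains (pvBget x (i : Int)) && pvBget x (i : Int) != n) = true
    · have hr' : pvBget x (i : Int) ∉ rv ∧ ¬ pvBget x (i : Int) = n := by
        simpa using hr
      rw [if_pos hr]
      by_cases hc : (!cv.contains (pvBget (i : Int) y) && pvBget (i : Int) y != n) = true
      · have hc' : pvBget (i : Int) y ∉ cv ∧ ¬ pvBget (i : Int) y = n := by
          simpa using hc
        rw [if_pos hc, ih (i + 1) (by omega)]
        have hrv : pvLineViol n (pvBget x (i : Int) :: (pvRowA x).drop (i + 1)) rv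
            = pvLineViol n ((pvRowA x).drop (i + 1))
                (if pvBget x (i : Int) != 0 then rv ++ [pvBget x (i : Int)] else rv) := by
          simp [pvLineViol, hr'.1, hr'.2]
        have hcv : pvLineViol n (pvBget (i : Int) y :: (pvColA y).drop (i + 1)) cv
            = pvLineViol n ((pvColA y).drop (i + 1))
                (if pvBget (i : Int) y != 0 then cv ++ [pvBget (i : Int) y] else cv) := by
          simp [pvLineViol, hc'.1, hc'.2]
        rw [hrv, hcv]
      · rw [if_neg hc]
        have hc' : pvBget (i : Int) y ∈ cv ∨ pvBget (i : Int) y = n := by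
          by_contra hcon
          rw [not_or] at hcon
          exact hc (by simp [hcon.1, hcon.2])
        have : pvLineViol n (pvBget (i : Int) y :: (pvColA y).drop (i + 1)) cv = true := by
          rcases hc' with hc' | hc' <;> simp [pvLineViol, hc']
        simp [this]
    · rw [if_neg hr]
      have hr' : pvBget x (i : Int) ∈ rv ∨ pvBget x (i : Int) = n := by
        by_contra hcon
        rw [not_or] at hcon
        exact hr (by simp [hcon.1, hcon.2])
      have : pvLineViol n (pvBget x (i : Int) :: (pvRowA x).drop (i + 1)) rv = true := by
        rcases hr' with hr' | hr' <;> simp [pvLineViol, hr']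
      simp [this]

-- set(nz) keeps the first occurrences in order, hence is a sublist of nz
theorem pvOfList_sublist (l : List Int) : (PySem.Set.ofList l).Sublist l := by
  induction l with
  | nil => simp [PySem.Set.ofList_nil]
  | cons x xs ih =>
    rw [PySem.Set.ofList_cons]
    refine List.Sublist.cons₂ x (List.Sublist.trans ?_ ih)
    simp only [PySem.Set.discard]
    exact List.filter_sublist

theorem pvOfList_len_iff (l : List Int) :
    ((PySem.Set.ofList l).length == l.length) = true ↔ l.Nodup := by
  constructor
  · intro h
    have h' := List.Sublist.eq_of_length (pvOfList_sublist l) (by simpa using h)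
    rw [← h']
    exact PySem.Set.nodup_ofList l
  · intro h
    simp [PySem.Set.ofList_eq_self_of_nodup l h]

-- characterisation of A's per-line check, with the seen-list invariant
theorem pvLineViol_char (n : Int) :
    ∀ (line seen : List Int), seen.Nodup → (0 : Int) ∉ seen → n ∉ seen →
      (pvLineViol n line seen = true ↔
        n ∈ line ∨ ¬ (seen ++ line.filter (fun v => v != 0)).Nodup) := by
  intro line
  induction line with
  | nil =>
    intro seen hnd h0 hn
    simp [pvLineViol, hnd]
  | cons v vs ih =>
    intro seen hnd h0 hn
    by_cases hv : v ∈ seen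
    · have hv0 : v ≠ 0 := fun h => h0 (h ▸ hv)
      have : ¬ (seen ++ (v :: vs).filter (fun v => v != 0)).Nodup := by
        intro hnd'
        have := List.disjoint_of_nodup_append hnd'
        exact this hv (by simp [hv0])
      simp [pvLineViol, hv, this]
    · by_cases hvn : v = n
      · simp [pvLineViol, hvn]
      · by_cases hv0 : v = 0
        · subst hv0
          have step : pvLineViol n (0 :: vs) seen = pvLineViol n vs seen := by
            simp [pvLineViol, hv, hvn]
          rw [step, ih seen hnd h0 hn]
          have hn0 : n ≠ 0 := fun h => hvn h.symm
          simp [hn0]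
        · have step : pvLineViol n (v :: vs) seen = pvLineViol n vs (seen ++ [v]) := by
            simp [pvLineViol, hv, hvn, hv0]
          have hnd' : (seen ++ [v]).Nodup := by
            simp [List.nodup_append, hnd]
            intro a ha h
            exact hv (h ▸ ha)
          have h0' : (0 : Int) ∉ seen ++ [v] := by
            simp [h0]
            exact fun h => hv0 h.symm
          have hn' : n ∉ seen ++ [v] := by
            simp [hn]
            exact fun h => hvn h.symm
          rw [step, ih (seen ++ [v]) hnd' h0' hn']
          simp [hv0]
          tauto

-- B's line check is the negation of A's, started on the empty seen-list
theorem pvLineOk_eq (line : List Int) (n : Int) :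
    pvLineOk line n = !(pvLineViol n line []) := by
  have hchar := pvLineViol_char n line [] (by simp) (by simp) (by simp)
  simp only [List.nil_append] at hchar
  by_cases hmem : n ∈ line
  · have hv : pvLineViol n line [] = true := hchar.mpr (Or.inl hmem)
    simp [pvLineOk, hmem, hv]
  · by_cases hnd : (line.filter (fun v => v != 0)).Nodup
    · have hv : pvLineViol n line [] = false := by
        rw [← Bool.not_eq_true, hchar]
        simp [hmem, hnd]
      have hb := (pvOfList_len_iff (line.filter (fun v => v != 0))).mpr hnd
      simp [pvLineOk, hmem, hv, hb]
    · have hv : pvLineViol n line [] = true := hchar.mpr (Or.inr hnd)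
      have hb : ¬ ((PySem.Set.ofList (line.filter (fun v => v != 0))).length
          == (line.filter (fun v => v != 0)).length) = true :=
        fun h => hnd ((pvOfList_len_iff _).mp h)
      simp only [pvLineOk, hv, Bool.not_true]
      rw [if_neg (by simpa using hmem)]
      simpa using hb

-- on valid x, B's materialised row is exactly A's row of cell reads
theorem pvRow_eq (x : Int) (hx1 : -8 ≤ x) (hx2 : x ≤ 9) :
    (PySem.List.pyGet? pvBoard (x - 1)).getD [] = pvRowA (x - 1) := by
  interval_cases x <;> decide

-- ===== VERDICT (by name: the statement is the Claim_ definition above) =====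
theorem easy_sudoku_spec : Claim_equal_easy_sudoku := by
  intro x y n _ hpre
  obtain ⟨hx1, hx2, hy1, hy2⟩ := hpre
  unfold Spec_easy_sudoku easy_sudoku
  rw [pvAGo_eq (x - 1) (y - 1) n 9 0 rfl [] []]
  simp only [List.drop_zero]
  rw [show easy_sudoku_alt x y n
      = (if pvLineOk ((PySem.List.pyGet? pvBoard (x - 1)).getD []) n
            && pvLineOk (pvColA (y - 1)) n
         then "No violation" else "Violation") from rfl]
  rw [pvRow_eq x hx1 hx2, pvLineOk_eq, pvLineOk_eq]
  rcases (pvLineViol n (pvRowA (x - 1)) []).eq_false_or_eq_true with h1 | h1 <;>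
    rcases (pvLineViol n (pvColA (y - 1)) []).eq_false_or_eq_true with h2 | h2 <;>
      simp [h1, h2]
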